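-- pv_equiv track=rewrite | github.com/zhangzheng18/Preinfer | src/statice_analysis/peripheral_block_analyzer.py | _cluster_addresses
-- ===== SOURCE A (Python) =====
-- from typing import Dict, List, Set, Tuple, Optional
--
-- def _cluster_addresses(addresses: List[int], max_gap: int = 0x100) -> List[List[int]]:
--     """
--     Cluster addresses that are close together into groups
--     """
--     if not addresses:
--         return []
--
--     clusters = []
--     current_cluster = [addresses[0]]
--
--     for addr in addresses[1:]:
--         if addr - current_cluster[-1] <= max_gap:
--             current_cluster.append(addr)
--         else:
--             clusters.append(current_cluster)
--             current_cluster = [addr]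
--
--     clusters.append(current_cluster)
--     return clusters
-- ===== SOURCE B (Python) =====
-- def _cluster_addresses(addresses, max_gap=0x100):
--     """Build the clustering right-to-left: fold each address onto the
--     clustering of its suffix, merging into its head cluster when close.
--     Clusters are accumulated reversed (appends only) and flipped at the end."""
--     rev = []  # clusters right-to-left, each cluster stored back-to-front
--     for addr in reversed(addresses):
--         if rev and rev[-1] and rev[-1][-1] - addr <= max_gap:
--             rev[-1].append(addr)
--         else:
--             rev.append([addr])
--     rev.reverse()
--     return [c[::-1] for c in rev]
-- ===== Notes on version B (the rewrite author's own statement) =====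
-- stated objective: alternative
-- what changed: B builds the clustering right-to-left in a single fold over reversed(addresses) that either starts a new cluster or merges the address into the head cluster of the suffix's clustering (accumulated reversed with appends, flipped once at the end), instead of A's left-to-right scan with a separate current-cluster accumulator and a final flush.
import Mathlib
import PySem

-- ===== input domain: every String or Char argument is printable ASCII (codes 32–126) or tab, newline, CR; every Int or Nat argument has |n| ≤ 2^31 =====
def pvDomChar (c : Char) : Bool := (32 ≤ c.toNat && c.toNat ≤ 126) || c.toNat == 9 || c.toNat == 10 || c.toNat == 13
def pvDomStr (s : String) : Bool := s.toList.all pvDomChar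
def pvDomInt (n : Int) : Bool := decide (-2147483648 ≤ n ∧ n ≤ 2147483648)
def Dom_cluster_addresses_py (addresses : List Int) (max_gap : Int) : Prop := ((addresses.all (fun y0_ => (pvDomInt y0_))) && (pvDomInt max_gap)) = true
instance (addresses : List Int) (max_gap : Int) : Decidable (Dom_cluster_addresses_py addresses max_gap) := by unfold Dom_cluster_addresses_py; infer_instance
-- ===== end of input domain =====

-- B builds the clustering right-to-left in one fold over reversed(addresses), merging each
-- address into the head cluster of its suffix's clustering (objective: alternative decomposition).

-- ===== PORT A =====
-- current_cluster is never empty, so Python's current_cluster[-1] is its last element (getLast!)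
def cluster_addresses_py (addresses : List Int) (max_gap : Int) : List (List Int) :=
  match addresses with
  | [] => []
  | a0 :: rest =>
    let p := rest.foldl (fun (p : List (List Int) × List Int) addr =>
        if addr - p.2.getLast! ≤ max_gap then (p.1, p.2 ++ [addr])
        else (p.1 ++ [p.2], [addr])) ([], [a0])
    p.1 ++ [p.2]

-- ===== PORT B =====
-- the body of B's loop: 'rev and rev[-1]' is the getLast? match on a nonempty last cluster,
-- 'rev[-1][-1]' its getLast!, 'rev[-1].append(addr)' rewrites the last cluster in place
def bstep (max_gap addr : Int) (rev : List (List Int)) : List (List Int) :=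
  match rev.getLast? with
  | some (c0 :: cs) =>
      if (c0 :: cs).getLast! - addr ≤ max_gap then rev.dropLast ++ [c0 :: (cs ++ [addr])]
      else rev ++ [[addr]]
  | _ => rev ++ [[addr]]

-- 'rev.reverse()' then 'c[::-1]' for each cluster
def cluster_addresses_py_alt (addresses : List Int) (max_gap : Int) : List (List Int) :=
  ((addresses.reverse.foldl (fun rev addr => bstep max_gap addr rev) []).reverse).map List.reverse

-- ===== PRECONDITION & SPEC =====
def Spec_cluster_addresses_py (addresses : List Int) (max_gap : Int) (out : List (List Int)) : Prop := out = cluster_addresses_py_alt addresses max_gap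
instance (addresses : List Int) (max_gap : Int) (out : List (List Int)) : Decidable (Spec_cluster_addresses_py addresses max_gap out) := by unfold Spec_cluster_addresses_py; infer_instance

-- ===== CLAIM (what is proved, stated in full; the proofs are below) =====
def Claim_equal_cluster_addresses_py : Prop := ∀ (addresses : List Int) (max_gap : Int), Dom_cluster_addresses_py addresses max_gap → Spec_cluster_addresses_py addresses max_gap (cluster_addresses_py addresses max_gap)

-- ===== LEMMAS AND PROOFS =====

-- proof-side view of B's step in natural orientation: merge addr into the head cluster
def hstep (max_gap addr : Int) (clusters : List (List Int)) : List (List Int) :=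
  match clusters with
  | (c0 :: cs) :: rest =>
      if c0 - addr ≤ max_gap then (addr :: c0 :: cs) :: rest
      else [addr] :: (c0 :: cs) :: rest
  | _ => [addr] :: clusters

-- 'glue cur a cl' : attach the pending cluster 'cur' (whose last element is a) in front of
-- the clustering 'cl' of the remaining suffix, merging with its head cluster when close.
def glue (max_gap : Int) (cur : List Int) (a : Int) (cl : List (List Int)) : List (List Int) :=
  match cl with
  | (c0 :: cs) :: rest => if c0 - a ≤ max_gap then (cur ++ c0 :: cs) :: rest else cur :: (c0 :: cs) :: rest
  | _ => cur :: cl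

lemma getLast!_concat' (l : List Int) (a : Int) : (l ++ [a]).getLast! = a := by
  induction l with
  | nil => rfl
  | cons x xs ih => simp [List.getLast!] at *

lemma eq_dropLast_concat (l : List Int) (h : l ≠ []) : l = l.dropLast ++ [l.getLast!] := by
  rcases List.eq_nil_or_concat l with rfl | ⟨front, a, rfl⟩
  · exact absurd rfl h
  · simp

lemma hstep_noNil (mg x : Int) (cl : List (List Int)) (h : [] ∉ cl) : [] ∉ hstep mg x cl := by
  match cl with
  | [] => simp [hstep]
  | [] :: rest => exact absurd (by simp) h
  | (c0 :: cs) :: rest =>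
    simp only [hstep]
    split_ifs <;> simp_all

lemma goB_noNil (mg : Int) (l : List Int) :
    [] ∉ l.foldr (fun x y => hstep mg x y) [] := by
  induction l with
  | nil => simp
  | cons x xs ih => exact hstep_noNil mg x _ ih

lemma glue_hstep (mg : Int) (cur : List Int) (a x : Int) (cl : List (List Int)) (h : [] ∉ cl) :
    glue mg (cur ++ [a]) a (hstep mg x cl) =
      if x - a ≤ mg then glue mg ((cur ++ [a]) ++ [x]) x cl
      else (cur ++ [a]) :: glue mg [x] x cl := by
  match cl with
  | [] => simp [hstep, glue]
  | [] :: rest => exact absurd (by simp) h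
  | (c0 :: cs) :: rest =>
    simp only [hstep, glue]
    split_ifs <;> simp_all [List.append_assoc]

lemma glue_single (mg x : Int) (cl : List (List Int)) (h : [] ∉ cl) :
    glue mg [x] x cl = hstep mg x cl := by
  match cl with
  | [] => simp [hstep, glue]
  | [] :: rest => exact absurd (by simp) h
  | (c0 :: cs) :: rest =>
    simp only [hstep, glue]
    split_ifs <;> rfl

lemma loopA (mg : Int) (l : List Int) :
    ∀ (clusters : List (List Int)) (cur : List Int) (a : Int),
    (l.foldl (fun (p : List (List Int) × List Int) addr =>
        if addr - p.2.getLast! ≤ mg then (p.1, p.2 ++ [addr])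
        else (p.1 ++ [p.2], [addr])) (clusters, cur ++ [a])).1 ++
      [(l.foldl (fun (p : List (List Int) × List Int) addr =>
        if addr - p.2.getLast! ≤ mg then (p.1, p.2 ++ [addr])
        else (p.1 ++ [p.2], [addr])) (clusters, cur ++ [a])).2] =
    clusters ++ glue mg (cur ++ [a]) a (l.foldr (fun x y => hstep mg x y) []) := by
  induction l with
  | nil => intro clusters cur a; simp [glue]
  | cons x xs ih =>
    intro clusters cur a
    simp only [List.foldl_cons, List.foldr_cons]
    rw [glue_hstep mg cur a x _ (goB_noNil mg xs)]
    by_cases hx : x - a ≤ mg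
    · simp only [getLast!_concat', hx, if_true]
      exact ih clusters (cur ++ [a]) x
    · simp only [getLast!_concat', hx, if_false]
      have := ih (clusters ++ [cur ++ [a]]) [] x
      simp only [List.nil_append] at this
      rw [this, List.append_assoc]
      simp

-- the natural-orientation view of B's reversed accumulator
def tview (rev : List (List Int)) : List (List Int) := (rev.reverse).map List.reverse

lemma bstep_noNil (mg x : Int) (rev : List (List Int)) (h : [] ∉ rev) : [] ∉ bstep mg x rev := by
  rcases List.eq_nil_or_concat rev with rfl | ⟨front, last, rfl⟩
  · simp [bstep]
  · match last with
    | [] => exact absurd (by simp) h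
    | c0 :: cs =>
      simp only [List.concat_eq_append] at h ⊢
      simp only [bstep, List.getLast?_concat]
      split_ifs <;> simp_all

lemma bstep_bridge (mg x : Int) (rev : List (List Int)) (h : [] ∉ rev) :
    tview (bstep mg x rev) = hstep mg x (tview rev) := by
  rcases List.eq_nil_or_concat rev with rfl | ⟨front, last, rfl⟩
  · simp [bstep, tview, hstep]
  · match last with
    | [] => exact absurd (by simp) h
    | c0 :: cs =>
      have hrev : (c0 :: cs).reverse = (c0 :: cs).getLast! :: ((c0 :: cs).dropLast).reverse := by
        conv_lhs => rw [eq_dropLast_concat (c0 :: cs) (by simp)]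
        simp
      simp only [List.concat_eq_append] at h ⊢
      simp only [bstep, List.getLast?_concat]
      by_cases hc : (c0 :: cs).getLast! - x ≤ mg
      · rw [if_pos hc]
        have hd : (front ++ [c0 :: cs]).dropLast = front := by simp
        have hm : c0 :: (cs ++ [x]) = (c0 :: cs) ++ [x] := rfl
        simp only [tview, hd, hm, List.reverse_append, List.reverse_cons, List.reverse_nil,
          List.nil_append, List.map_cons, List.singleton_append, hrev]
        simp only [hstep]
        rw [if_pos hc]
      · rw [if_neg hc]
        simp only [tview, List.reverse_append, List.reverse_cons, List.reverse_nil,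
          List.nil_append, List.map_cons, List.map_nil, List.map_append, List.singleton_append, hrev]
        simp only [hstep]
        rw [if_neg hc]

lemma foldl_bridge (mg : Int) (l : List Int) :
    ∀ (rev : List (List Int)), [] ∉ rev →
    tview (l.foldl (fun rev addr => bstep mg addr rev) rev) =
      l.foldl (fun cl addr => hstep mg addr cl) (tview rev) := by
  induction l with
  | nil => intro rev _; rfl
  | cons x xs ih =>
    intro rev h
    simp only [List.foldl_cons]
    rw [ih _ (bstep_noNil mg x rev h), bstep_bridge mg x rev h]

-- ===== VERDICT (by name: the statement is the Claim_ definition above) =====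
theorem cluster_addresses_py_spec : Claim_equal_cluster_addresses_py := by
  intro addresses max_gap _
  unfold Spec_cluster_addresses_py
  have halt : cluster_addresses_py_alt addresses max_gap
      = addresses.foldr (fun x y => hstep max_gap x y) [] := by
    unfold cluster_addresses_py_alt
    have := foldl_bridge max_gap addresses.reverse [] (by simp)
    simp only [tview] at this
    rw [this]
    simp [List.foldl_reverse]
  rw [halt]
  rcases addresses with _ | ⟨a0, rest⟩
  · rfl
  · simp only [cluster_addresses_py]
    have h := loopA max_gap rest [] [] a0
    simp only [List.nil_append] at h
    rw [h, glue_single max_gap a0 _ (goB_noNil max_gap rest), List.foldr_cons]
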